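-- pv_equiv track=rewrite | github.com/Avi161/AC-Solver-Caltech | experiments/iterative_refinement.py | merge_path_dicts
-- ===== SOURCE A (Python) =====
-- def merge_path_dicts(existing, new, max_path_length=None):
--     """
--     Merge two path dictionaries, keeping the shortest path per presentation.
--
--     Parameters:
--         existing: current paths dict
--         new: newly discovered paths dict
--         max_path_length: reject paths longer than this
--
--     Returns:
--         tuple: (merged_dict, num_new_presentations, num_shorter_paths)
--     """
--     merged = dict(existing)
--     new_count = 0
--     shorter_count = 0
--
--     for pres_tuple, actions in new.items():
--         if max_path_length is not None and len(actions) > max_path_length: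
--             continue
--
--         if pres_tuple not in merged:
--             merged[pres_tuple] = actions
--             new_count += 1
--         elif len(actions) < len(merged[pres_tuple]):
--             merged[pres_tuple] = actions
--             shorter_count += 1
--
--     return merged, new_count, shorter_count
-- ===== SOURCE B (Python) =====
-- def merge_path_dicts(existing, new, max_path_length=None):
--     """Join decomposition: index the admissible new paths once, rebuild merged by a
--     pass over `existing` choosing the per-key winner, then append the genuinely new keys."""
--     candidates = {k: v for k, v in new.items()
--                   if max_path_length is None or len(v) <= max_path_length}
--     merged = {}
--     shorter_count = 0
--     for k, v in existing.items():
--         w = candidates.get(k)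
--         if w is not None and len(w) < len(v):
--             merged[k] = w
--             shorter_count += 1
--         else:
--             merged[k] = v
--     appended = [(k, v) for k, v in candidates.items() if k not in existing]
--     merged.update(appended)
--     return merged, len(appended), shorter_count
-- ===== Notes on version B (the rewrite author's own statement) =====
-- stated objective: alternative
-- what changed: A iterates over `new`, mutating a copy of `existing` and bumping two counters per entry; B is a join: it indexes the admissible new paths once, rebuilds `merged` by a pass over `existing` that picks the per-key winner (counting strict improvements), and separately appends the new keys absent from `existing` (their number is new_count).
import Mathlib
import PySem

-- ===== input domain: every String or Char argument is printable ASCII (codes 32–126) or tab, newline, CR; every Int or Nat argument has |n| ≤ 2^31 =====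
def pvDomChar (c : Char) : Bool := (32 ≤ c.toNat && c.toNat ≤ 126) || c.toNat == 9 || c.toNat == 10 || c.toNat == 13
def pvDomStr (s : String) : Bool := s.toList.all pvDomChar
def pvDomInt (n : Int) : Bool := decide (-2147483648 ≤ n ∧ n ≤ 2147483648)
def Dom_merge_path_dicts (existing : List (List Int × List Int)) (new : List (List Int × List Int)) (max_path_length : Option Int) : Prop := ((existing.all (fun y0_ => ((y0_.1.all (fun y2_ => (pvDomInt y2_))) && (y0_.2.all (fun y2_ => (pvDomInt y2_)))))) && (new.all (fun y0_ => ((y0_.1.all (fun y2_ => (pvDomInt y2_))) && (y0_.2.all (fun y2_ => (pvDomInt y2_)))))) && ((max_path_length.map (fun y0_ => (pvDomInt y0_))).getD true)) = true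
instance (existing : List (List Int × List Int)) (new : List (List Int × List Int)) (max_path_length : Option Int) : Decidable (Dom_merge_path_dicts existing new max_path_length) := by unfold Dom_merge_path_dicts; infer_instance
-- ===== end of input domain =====

-- B replaces A's single stateful loop over `new` by a join decomposition: index the
-- admissible new paths once, rebuild merged by a pass over `existing` picking per-key
-- winners, then append the genuinely new keys; objective: alternative (same cost).

-- ===== PORT A =====
-- one loop step of A's `for pres_tuple, actions in new.items()` body
def pvStepA (max_path_length : Option Int)
    (st : PySem.Dict (List Int) (List Int) × Int × Int) (p : List Int × List Int) :
    PySem.Dict (List Int) (List Int) × Int × Int :=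
  if (match max_path_length with
      | some m => decide (m < (p.2.length : Int))
      | none => false) then st
  else if st.1.contains p.1 = false then (st.1.insert p.1 p.2, st.2.1 + 1, st.2.2)
  -- `merged[pres_tuple]` is guarded by the membership test above, so `getD [] ` is exact here
  else if p.2.length < ((st.1.get? p.1).getD []).length then
    (st.1.insert p.1 p.2, st.2.1, st.2.2 + 1)
  else st

def merge_path_dicts (existing : List (List Int × List Int)) (new : List (List Int × List Int)) (max_path_length : Option Int) : (List (List Int × List Int)) × Int × Int :=
  let r := new.foldl (pvStepA max_path_length) (PySem.Dict.mk existing, 0, 0)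
  (r.1.items, r.2.1, r.2.2)

-- ===== PORT B =====
-- B's dict comprehension filter: max_path_length is None or len(v) <= max_path_length
def pvKeepB (max_path_length : Option Int) (p : List Int × List Int) : Bool :=
  match max_path_length with
  | none => true
  | some m => decide ((p.2.length : Int) ≤ m)

-- candidates = {k: v for k, v in new.items() if …}  (`new` is a dict: keys distinct)
def pvCand (max_path_length : Option Int) (new : List (List Int × List Int)) :
    PySem.Dict (List Int) (List Int) :=
  PySem.Dict.mk (new.filter (pvKeepB max_path_length))

-- the `for k, v in existing.items()` loop: merged entries in order + shorter_count
def pvJoin (f : PySem.Dict (List Int) (List Int)) :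
    List (List Int × List Int) → List (List Int × List Int) × Int
  | [] => ([], 0)
  | (k, v) :: rest =>
    let r := pvJoin f rest
    match f.get? k with
    | some w => if w.length < v.length then ((k, w) :: r.1, r.2 + 1) else ((k, v) :: r.1, r.2)
    | none => ((k, v) :: r.1, r.2)

def merge_path_dicts_alt (existing : List (List Int × List Int)) (new : List (List Int × List Int)) (max_path_length : Option Int) : (List (List Int × List Int)) × Int × Int :=
  let cand := pvCand max_path_length new
  let j := pvJoin cand existing
  -- appended = [(k, v) for k, v in candidates.items() if k not in existing]
  let appended := cand.items.filter (fun p => !((PySem.Dict.mk existing).contains p.1))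
  -- merged.update(appended): appended keys are disjoint from merged's keys, so update appends — exact here
  (j.1 ++ appended, (appended.length : Int), j.2)

-- ===== PRECONDITION & SPEC =====
-- Pre_ only requires that each association list represents a Python dict, i.e. has no
-- duplicate keys; every input the Python function accepts (two dicts) satisfies it.
def Pre_merge_path_dicts (existing : List (List Int × List Int)) (new : List (List Int × List Int)) (max_path_length : Option Int) : Prop :=
  (existing.map Prod.fst).Nodup ∧ (new.map Prod.fst).Nodup
instance (existing : List (List Int × List Int)) (new : List (List Int × List Int)) (max_path_length : Option Int) : Decidable (Pre_merge_path_dicts existing new max_path_length) := by unfold Pre_merge_path_dicts; infer_instance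

def pvWitness_merge_path_dicts : (List (List Int × List Int)) × (List (List Int × List Int)) × Option Int :=
  ([([1], [0, 0]), ([2], [5])], [([1], [7]), ([3], [1, 2, 3])], some 2)

def Spec_merge_path_dicts (existing : List (List Int × List Int)) (new : List (List Int × List Int)) (max_path_length : Option Int) (out : (List (List Int × List Int)) × Int × Int) : Prop := out = merge_path_dicts_alt existing new max_path_length
instance (existing : List (List Int × List Int)) (new : List (List Int × List Int)) (max_path_length : Option Int) (out : (List (List Int × List Int)) × Int × Int) : Decidable (Spec_merge_path_dicts existing new max_path_length out) := by unfold Spec_merge_path_dicts; infer_instance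

-- ===== CLAIM (what is proved, stated in full; the proofs are below) =====
def Claim_equal_merge_path_dicts : Prop := ∀ (existing : List (List Int × List Int)) (new : List (List Int × List Int)) (max_path_length : Option Int), Dom_merge_path_dicts existing new max_path_length → Pre_merge_path_dicts existing new max_path_length → Spec_merge_path_dicts existing new max_path_length (merge_path_dicts existing new max_path_length)

-- ===== LEMMAS AND PROOFS =====

-- pvJoin only consults the lookup table on the keys it visits
theorem pvJoin_congr (f g : PySem.Dict (List Int) (List Int)) :
    ∀ xs : List (List Int × List Int),
      (∀ p ∈ xs, f.get? p.1 = g.get? p.1) → pvJoin f xs = pvJoin g xs := by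
  intro xs
  induction xs with
  | nil => intro _; rfl
  | cons a t ih =>
    intro h
    obtain ⟨k, v⟩ := a
    have hk := h (k, v) (by simp)
    simp only [pvJoin, ih (fun p hp => h p (List.mem_cons_of_mem _ hp)), hk]

-- joining against an empty table copies the list
theorem pvJoin_none (f : PySem.Dict (List Int) (List Int)) :
    ∀ xs : List (List Int × List Int),
      (∀ p ∈ xs, f.get? p.1 = none) → pvJoin f xs = (xs, 0) := by
  intro xs
  induction xs with
  | nil => intro _; rfl
  | cons a t ih =>
    intro h
    obtain ⟨k, v⟩ := a
    have hk := h (k, v) (by simp)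
    simp only [pvJoin, ih (fun p hp => h p (List.mem_cons_of_mem _ hp)), hk]

theorem pvJoin_append (f : PySem.Dict (List Int) (List Int)) :
    ∀ xs ys : List (List Int × List Int),
      pvJoin f (xs ++ ys) =
        ((pvJoin f xs).1 ++ (pvJoin f ys).1, (pvJoin f xs).2 + (pvJoin f ys).2) := by
  intro xs ys
  induction xs with
  | nil => simp [pvJoin]
  | cons a t ih =>
    obtain ⟨k, v⟩ := a
    simp only [List.cons_append, pvJoin, ih]
    cases f.get? k with
    | none => simp
    | some w =>
      by_cases hs : w.length < v.length
      · simp [hs]; ring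
      · simp [hs]

-- removing key k from the table while overwriting the (strictly improved) entry at k
theorem pvJoin_overwrite_short (f g : PySem.Dict (List Int) (List Int)) (k w : List Int) :
    ∀ xs : List (List Int × List Int),
      (xs.map Prod.fst).Nodup →
      f.get? k = some w → g.get? k = none →
      (∀ k', k' ≠ k → f.get? k' = g.get? k') →
      k ∈ xs.map Prod.fst →
      (∀ v, (k, v) ∈ xs → w.length < v.length) →
      pvJoin f xs =
        ((pvJoin g (xs.map (fun p => if p.1 == k then (k, w) else p))).1,
         (pvJoin g (xs.map (fun p => if p.1 == k then (k, w) else p))).2 + 1) := by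
  intro xs
  induction xs with
  | nil => intro _ _ _ _ h; simp at h
  | cons a t ih =>
    intro hnd hf hg hfg hmem hshort
    obtain ⟨a1, a2⟩ := a
    by_cases hak : a1 = k
    · subst hak
      have hknt : a1 ∉ t.map Prod.fst := (List.nodup_cons.1 (by simpa using hnd)).1
      have hmap : t.map (fun p => if p.1 == a1 then (a1, w) else p) = t := by
        conv_rhs => rw [← List.map_id t]
        refine List.map_congr_left ?_
        intro p hp
        have : p.1 ≠ a1 := fun h => hknt (h ▸ List.mem_map_of_mem hp)
        simp [this]
      have htail : pvJoin f t = pvJoin g t := by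
        refine pvJoin_congr f g t ?_
        intro p hp
        exact hfg p.1 (fun h => hknt (h ▸ List.mem_map_of_mem hp))
      have hs : w.length < a2.length := hshort a2 (by simp)
      simp only [List.map_cons, beq_self_eq_true, if_pos, pvJoin, hf, hg, hs, hmap, htail]
    · have hne : (a1 == k) = false := by simp [hak]
      have hmem' : k ∈ t.map Prod.fst := by
        simp only [List.map_cons, List.mem_cons] at hmem
        rcases hmem with h | h
        · exact absurd h.symm hak
        · exact h
      have ih' := ih (List.nodup_cons.1 (by simpa using hnd)).2 hf hg hfg hmem'
        (fun v hv => hshort v (List.mem_cons_of_mem _ hv))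
      have hga : f.get? a1 = g.get? a1 := hfg a1 hak
      have hmap : ((a1, a2) :: t).map (fun p => if p.1 == k then (k, w) else p)
          = (a1, a2) :: t.map (fun p => if p.1 == k then (k, w) else p) := by
        simp only [List.map_cons]
        rw [if_neg (by simp [hak])]
      rw [hmap]
      simp only [pvJoin]
      rw [hga, ih']
      cases hq : g.get? a1 with
      | none => simp
      | some u =>
        by_cases hs : u.length < a2.length
        · simp [hs]
        · simp [hs]

-- removing key k from the table when the entry at k is not strictly improved
theorem pvJoin_overwrite_long (f g : PySem.Dict (List Int) (List Int)) (k w : List Int) :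
    ∀ xs : List (List Int × List Int),
      f.get? k = some w → g.get? k = none →
      (∀ k', k' ≠ k → f.get? k' = g.get? k') →
      (∀ v, (k, v) ∈ xs → ¬ w.length < v.length) →
      pvJoin f xs = pvJoin g xs := by
  intro xs
  induction xs with
  | nil => intro _ _ _ _; rfl
  | cons a t ih =>
    intro hf hg hfg hlong
    obtain ⟨a1, a2⟩ := a
    have ih' := ih hf hg hfg (fun v hv => hlong v (List.mem_cons_of_mem _ hv))
    by_cases hak : a1 = k
    · subst hak
      have hs : ¬ w.length < a2.length := hlong a2 (by simp)
      simp only [pvJoin, hf, hg, hs, if_false, ih']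
    · have hga : f.get? a1 = g.get? a1 := hfg a1 hak
      simp only [pvJoin]
      rw [hga, ih']

-- keys of a dict built from a literal list
theorem pvGetNoneOfNotMem (l : List (List Int × List Int)) (k : List Int)
    (h : k ∉ l.map Prod.fst) : (PySem.Dict.mk l).get? k = none := by
  rw [PySem.Dict.get?_eq_none_iff_not_mem_keys]
  simpa [PySem.Dict.keys] using h

-- A's loop step when the entry passes B's length filter
theorem pvStepA_keep (mpl : Option Int) (st : PySem.Dict (List Int) (List Int) × Int × Int)
    (p : List Int × List Int) (hk : pvKeepB mpl p = true) :
    pvStepA mpl st p =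
      (if st.1.contains p.1 = false then (st.1.insert p.1 p.2, st.2.1 + 1, st.2.2)
       else if p.2.length < ((st.1.get? p.1).getD []).length then
         (st.1.insert p.1 p.2, st.2.1, st.2.2 + 1)
       else st) := by
  cases mpl with
  | none => rfl
  | some m =>
    simp only [pvKeepB, decide_eq_true_eq] at hk
    have hdec : decide (m < ((p.2.length : Int))) = false := by simp; omega
    simp [pvStepA, hdec]

-- A's loop step when the entry fails B's length filter
theorem pvStepA_skip (mpl : Option Int) (st : PySem.Dict (List Int) (List Int) × Int × Int)
    (p : List Int × List Int) (hk : pvKeepB mpl p = false) : pvStepA mpl st p = st := by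
  cases mpl with
  | none => simp [pvKeepB] at hk
  | some m =>
    simp only [pvKeepB, decide_eq_false_iff_not, not_le] at hk
    simp [pvStepA, hk]

-- main loop invariant: A's fold from dict d computes B's join-plus-append answer
theorem pvMain (mpl : Option Int) :
    ∀ (ns : List (List Int × List Int)) (d : PySem.Dict (List Int) (List Int)) (nc sc : Int),
      (ns.map Prod.fst).Nodup → d.keys.Nodup →
      ns.foldl (pvStepA mpl) (d, nc, sc) =
        (PySem.Dict.mk ((pvJoin (PySem.Dict.mk (ns.filter (pvKeepB mpl))) d.items).1
            ++ (ns.filter (pvKeepB mpl)).filter (fun p => !(d.contains p.1))),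
         nc + (((ns.filter (pvKeepB mpl)).filter (fun p => !(d.contains p.1))).length : Int),
         sc + (pvJoin (PySem.Dict.mk (ns.filter (pvKeepB mpl))) d.items).2) := by
  intro ns
  induction ns with
  | nil =>
    intro d nc sc _ _
    have hj : pvJoin (PySem.Dict.mk ([] : List (List Int × List Int))) d.items = (d.items, 0) :=
      pvJoin_none _ d.items (fun p _ => pvGetNoneOfNotMem [] p.1 (by simp))
    simp [hj]
  | cons p rest ih =>
    intro d nc sc hnd hkeys
    have hnd1 : (p.1 :: rest.map Prod.fst).Nodup := by rw [List.map_cons] at hnd; exact hnd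
    obtain ⟨hmem, hnd'⟩ := List.nodup_cons.1 hnd1
    have hFnotk : p.1 ∉ (rest.filter (pvKeepB mpl)).map Prod.fst := by
      intro h
      obtain ⟨q, hq, hq1⟩ := List.mem_map.1 h
      exact hmem (hq1 ▸ List.mem_map_of_mem (List.mem_of_mem_filter hq))
    have hgnone : (PySem.Dict.mk (rest.filter (pvKeepB mpl))).get? p.1 = none :=
      pvGetNoneOfNotMem _ _ hFnotk
    by_cases hk : pvKeepB mpl p = true
    · have hfilt : (p :: rest).filter (pvKeepB mpl) = p :: rest.filter (pvKeepB mpl) := by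
        simp [hk]
      set F := rest.filter (pvKeepB mpl) with hF
      have hfget : (PySem.Dict.mk (p :: F)).get? p.1 = some p.2 := by
        rw [PySem.Dict.get?_mk_cons]; simp
      have hfg : ∀ k', k' ≠ p.1 →
          (PySem.Dict.mk (p :: F)).get? k' = (PySem.Dict.mk F).get? k' := by
        intro k' hne
        rw [PySem.Dict.get?_mk_cons]
        simp [(by simpa using hne.symm : ¬ p.1 = k')]
      by_cases hc : d.contains p.1 = true
      · -- key already present in d
        obtain ⟨v0, hv0⟩ : ∃ v0, d.get? p.1 = some v0 := by
          have := PySem.Dict.contains_eq_isSome_get? d p.1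
          rw [hc] at this
          exact Option.isSome_iff_exists.1 this.symm
        have hshort_all : ∀ hs : p.2.length < v0.length, ∀ v, (p.1, v) ∈ d.items → p.2.length < v.length := by
          intro hs v hv
          have := PySem.Dict.get?_of_mem_items d hv hkeys
          rw [hv0] at this
          cases this; exact hs
        have hfiltApp : ∀ d' : PySem.Dict (List Int) (List Int),
            (∀ q ∈ F, d'.contains q.1 = d.contains q.1) →
            F.filter (fun q => !(d'.contains q.1)) = F.filter (fun q => !(d.contains q.1)) := by
          intro d' h
          refine List.filter_congr ?_
          intro q hq
          rw [h q hq]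
        by_cases hs : p.2.length < v0.length
        · -- strictly shorter: overwrite in place, shorter_count += 1
          set d' := d.insert p.1 p.2 with hd'
          have hkeys' : d'.keys.Nodup := PySem.Dict.nodup_keys_insert d p.1 p.2 hkeys
          have hitems : d'.items = d.items.map (fun q => if q.1 == p.1 then (p.1, p.2) else q) :=
            PySem.Dict.items_insert_of_contains d p.2 hc
          have hkm0 : (p.1, v0) ∈ d.items := PySem.Dict.mem_items_of_get?_eq_some d hv0
          have hkmem : p.1 ∈ d.items.map Prod.fst := List.mem_map.2 ⟨(p.1, v0), hkm0, rfl⟩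
          have hov := pvJoin_overwrite_short (PySem.Dict.mk (p :: F)) (PySem.Dict.mk F) p.1 p.2
            d.items (by simpa [PySem.Dict.keys] using hkeys) hfget hgnone hfg
            (by simpa [PySem.Dict.keys] using hkmem) (hshort_all hs)
          have hcont : ∀ q ∈ F, d'.contains q.1 = d.contains q.1 := by
            intro q hq
            rw [hd', PySem.Dict.contains_insert]
            have : q.1 ≠ p.1 := fun h => hFnotk (h ▸ List.mem_map_of_mem hq)
            simp [this]
          rw [List.foldl_cons]
          have hstep : pvStepA mpl (d, nc, sc) p = (d', nc, sc + 1) := by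
            rw [pvStepA_keep mpl (d, nc, sc) p hk]
            simp [hc, hv0, hs, hd']
          rw [hstep, ih d' nc (sc + 1) hnd' hkeys']
          rw [hfilt]
          have hJ : pvJoin (PySem.Dict.mk (p :: F)) d.items =
              ((pvJoin (PySem.Dict.mk F) d'.items).1, (pvJoin (PySem.Dict.mk F) d'.items).2 + 1) := by
            rw [hov, hitems]
          have hA : (p :: F).filter (fun q => !(d.contains q.1)) =
              F.filter (fun q => !(d.contains q.1)) := by
            simp [hc]
          rw [hfiltApp d' hcont, hJ, hA]
          refine Prod.ext rfl (Prod.ext rfl ?_)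
          simp; ring
        · -- not strictly shorter: nothing changes
          have hov := pvJoin_overwrite_long (PySem.Dict.mk (p :: F)) (PySem.Dict.mk F) p.1 p.2
            d.items hfget hgnone hfg
            (fun v hv => by
              have := PySem.Dict.get?_of_mem_items d hv hkeys
              rw [hv0] at this; cases this; exact hs)
          rw [List.foldl_cons]
          have hstep : pvStepA mpl (d, nc, sc) p = (d, nc, sc) := by
            rw [pvStepA_keep mpl (d, nc, sc) p hk]
            simp [hc, hv0, hs]
          rw [hstep, ih d nc sc hnd' hkeys]
          rw [hfilt, hov]
          have hA : (p :: F).filter (fun q => !(d.contains q.1)) =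
              F.filter (fun q => !(d.contains q.1)) := by
            simp [hc]
          rw [hA]
      · -- genuinely new key: append, new_count += 1
        have hcF : d.contains p.1 = false := by simpa using hc
        set d' := d.insert p.1 p.2 with hd'
        have hkeys' : d'.keys.Nodup := PySem.Dict.nodup_keys_insert d p.1 p.2 hkeys
        have hitems : d'.items = d.items ++ [p] := by
          have := PySem.Dict.items_insert_of_not_contains d p.2 hcF
          simpa using this
        have hknotd : p.1 ∉ d.items.map Prod.fst := by
          intro h
          have hck : d.contains p.1 = true := by
            rw [PySem.Dict.contains_eq_decide_mem_keys]
            simpa [PySem.Dict.keys] using h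
          rw [hck] at hcF
          cases hcF
        have hcongr : pvJoin (PySem.Dict.mk (p :: F)) d.items = pvJoin (PySem.Dict.mk F) d.items := by
          refine pvJoin_congr _ _ d.items ?_
          intro q hq
          exact hfg q.1 (fun h => hknotd (h ▸ List.mem_map_of_mem hq))
        have happ : pvJoin (PySem.Dict.mk F) d'.items =
            ((pvJoin (PySem.Dict.mk F) d.items).1 ++ [p], (pvJoin (PySem.Dict.mk F) d.items).2) := by
          rw [hitems, pvJoin_append]
          have : pvJoin (PySem.Dict.mk F) [p] = ([p], 0) := by
            refine pvJoin_none _ [p] ?_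
            intro q hq
            simp at hq
            subst hq
            exact hgnone
          rw [this]
          simp
        have hcont : ∀ q ∈ F, d'.contains q.1 = d.contains q.1 := by
          intro q hq
          rw [hd', PySem.Dict.contains_insert]
          have : q.1 ≠ p.1 := fun h => hFnotk (h ▸ List.mem_map_of_mem hq)
          simp [this]
        rw [List.foldl_cons]
        have hstep : pvStepA mpl (d, nc, sc) p = (d', nc + 1, sc) := by
          rw [pvStepA_keep mpl (d, nc, sc) p hk]
          simp [hcF, hd']
        rw [hstep, ih d' (nc + 1) sc hnd' hkeys']
        rw [hfilt]
        have hA : (p :: F).filter (fun q => !(d.contains q.1)) =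
            p :: F.filter (fun q => !(d.contains q.1)) := by
          simp [hcF]
        have hfiltApp : F.filter (fun q => !(d'.contains q.1)) = F.filter (fun q => !(d.contains q.1)) := by
          refine List.filter_congr ?_
          intro q hq
          rw [hcont q hq]
        rw [hfiltApp, hA, hcongr, happ]
        refine Prod.ext ?_ (Prod.ext ?_ rfl)
        · simp
        · simp
          ring
    · -- filtered out by max_path_length
      have hkF : pvKeepB mpl p = false := by simpa using hk
      have hfilt : (p :: rest).filter (pvKeepB mpl) = rest.filter (pvKeepB mpl) := by
        simp [hkF]
      rw [List.foldl_cons]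
      have hstep : pvStepA mpl (d, nc, sc) p = (d, nc, sc) := pvStepA_skip mpl (d, nc, sc) p hkF
      rw [hstep, ih d nc sc hnd' hkeys, hfilt]

-- ===== VERDICT (by name: the statement is the Claim_ definition above) =====
theorem merge_path_dicts_spec : Claim_equal_merge_path_dicts := by
  intro existing new mpl _ hpre
  unfold Spec_merge_path_dicts merge_path_dicts merge_path_dicts_alt pvCand
  have h := pvMain mpl new (PySem.Dict.mk existing) 0 0 hpre.2
    (by simpa [PySem.Dict.keys] using hpre.1)
  rw [h]
  simp
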